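-- pv_equiv track=rewrite | github.com/maisamkhorshidi/gp_package | genforge/scangenes.py | scangenes
-- ===== SOURCE A (Python) =====
-- def scangenes(genes, numx):
--     """
--     Scan a single multigene individual for all input variables and return a frequency vector.
--
--     Args:
--     genes (list): A list of genes, where each gene is a list of encoded expressions.
--     numx (int): The number of input variables.
--
--     Returns:
--     list: A frequency vector indicating the number of times each input variable appears.
--     """
--     numtrees = len(genes)
--     xhits = [0] * numx
--
--     for jj in range(numtrees):
--         numgenes = len(genes[jj])
--         for i in range(numx):
--             istr = f'x{i + 1}'  # MATLAB indices are 1-based, Python's are 0-based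
--             for j in range(numgenes):
--                 k1 = genes[jj][j].count(f'{istr},')
--                 k2 = genes[jj][j].count(f'{istr})')
--
--                 # Workaround for special case (trees containing a single terminal node)
--                 if genes[jj][j] == istr:
--                     xhits[i] += 1
--
--                 xhits[i] += k1 + k2
--
--     return xhits
-- ===== SOURCE B (Python) =====
-- def _runs(s):
--     """Digit runs that appear as 'x<digits>' immediately followed by ',' or ')'."""
--     out = []
--     i, L = 0, len(s)
--     while i < L:
--         if s[i] == 'x':
--             j = i + 1
--             while j < L and s[j].isdigit():
--                 j += 1
--             if j > i + 1 and j < L and s[j] in ',)':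
--                 out.append(s[i + 1:j])
--             i = max(j, i + 1)
--         else:
--             i += 1
--     return out
--
--
-- def scangenes(genes, numx):
--     table = {str(i): i - 1 for i in range(1, numx + 1)}
--     counts = [0] * numx
--     for gene in genes:
--         for s in gene:
--             for ds in _runs(s):
--                 idx = table.get(ds)
--                 if idx is not None:
--                     counts[idx] += 1
--             if s[:1] == 'x':
--                 idx = table.get(s[1:])
--                 if idx is not None:
--                     counts[idx] += 1
--     return counts
-- ===== Notes on version B (the rewrite author's own statement) =====
-- stated objective: faster
-- what changed: Instead of scanning every gene string once per input variable with str.count (numx passes per string), B tokenizes each string in a single pass, extracting each 'x<digits>' run followed by ',' or ')', and increments a count array via a precomputed digit-string-to-index dict.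
import Mathlib
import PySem

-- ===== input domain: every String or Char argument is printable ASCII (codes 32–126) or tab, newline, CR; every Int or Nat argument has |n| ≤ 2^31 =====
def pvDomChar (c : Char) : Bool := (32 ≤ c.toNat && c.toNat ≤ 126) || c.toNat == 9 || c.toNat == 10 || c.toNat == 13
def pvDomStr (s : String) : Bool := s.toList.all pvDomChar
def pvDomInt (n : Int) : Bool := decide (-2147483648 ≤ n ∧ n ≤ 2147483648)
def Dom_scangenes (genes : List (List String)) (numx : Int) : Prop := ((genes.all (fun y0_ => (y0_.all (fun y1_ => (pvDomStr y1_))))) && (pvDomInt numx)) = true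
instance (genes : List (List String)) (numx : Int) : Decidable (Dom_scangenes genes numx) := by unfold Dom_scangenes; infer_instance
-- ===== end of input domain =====

-- B replaces A's per-variable str.count passes (numx scans of every gene string) by a single
-- left-to-right tokenizing pass per string, looking matched 'x<digits>' runs up in a
-- precomputed digit-string → slot dictionary (objective: faster, asymptotically in numx).

-- ===== PORT A =====
-- literal transliteration of A; strings are handled at the List Char level via PySem.Chars
def scangenes (genes : List (List String)) (numx : Int) : List Int :=
  let numtrees : Int := genes.length
  let xhits : List Int := List.replicate numx.toNat 0
  (PySem.List.pyRange 0 numtrees 1).foldl (fun xh jj =>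
    let gene := PySem.List.pyGetD genes jj []
    let numgenes : Int := gene.length
    (PySem.List.pyRange 0 numx 1).foldl (fun xh i =>
      let istr : List Char := 'x' :: PySem.Int.toChars (i + 1)   -- f'x{i+1}'
      (PySem.List.pyRange 0 numgenes 1).foldl (fun xh j =>
        let s : List Char := (PySem.List.pyGetD gene j "").toList
        let k1 : Int := PySem.Chars.count s (istr ++ [','])      -- .count(f'{istr},')
        let k2 : Int := PySem.Chars.count s (istr ++ [')'])      -- .count(f'{istr})')
        let xh := if s = istr then PySem.List.pySetD xh i (PySem.List.pyGetD xh i 0 + 1) else xh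
        PySem.List.pySetD xh i (PySem.List.pyGetD xh i 0 + (k1 + k2))) xh) xh) xhits

-- ===== PORT B =====
-- _runs(s): the while-loop scanner; i = j becomes recursing on the dropWhile remainder
def scanRuns : List Char → List (List Char)
  | [] => []
  | c :: rest =>
    if c = 'x' then
      let ds := rest.takeWhile PySem.Chars.isdigit
      let rest' := rest.dropWhile PySem.Chars.isdigit
      match rest' with
      | [] => []
      | d :: _ =>
        if (d = ',' ∨ d = ')') ∧ ds ≠ [] then ds :: scanRuns rest' else scanRuns rest'
    else scanRuns rest
termination_by l => l.length
decreasing_by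
  · simp only [List.length_cons]
    have := List.length_dropWhile_le (p := PySem.Chars.isdigit) (l := rest)
    omega
  · simp only [List.length_cons]
    have := List.length_dropWhile_le (p := PySem.Chars.isdigit) (l := rest)
    omega
  · simp

-- table = {str(i): i - 1 for i in range(1, numx + 1)}  (string keys as List Char)
def mkTable (numx : Int) : PySem.Dict (List Char) Int :=
  (PySem.List.pyRange 1 (numx + 1) 1).foldl
    (fun d i => d.insert (PySem.Int.toChars i) (i - 1)) PySem.Dict.empty

def scangenes_alt (genes : List (List String)) (numx : Int) : List Int :=
  let table := mkTable numx
  let counts : List Int := List.replicate numx.toNat 0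
  genes.foldl (fun counts gene =>
    gene.foldl (fun counts s =>
      let cs := s.toList
      let counts := (scanRuns cs).foldl (fun counts ds =>
        match table.get? ds with
        | some idx => PySem.List.pySetD counts idx (PySem.List.pyGetD counts idx 0 + 1)
        | none => counts) counts
      match cs with                                   -- if s[:1] == 'x': look up s[1:]
      | 'x' :: restCs =>
        (match table.get? restCs with
         | some idx => PySem.List.pySetD counts idx (PySem.List.pyGetD counts idx 0 + 1)
         | none => counts)
      | _ => counts) counts) counts

-- ===== PRECONDITION & SPEC =====
def Spec_scangenes (genes : List (List String)) (numx : Int) (out : List Int) : Prop := out = scangenes_alt genes numx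
instance (genes : List (List String)) (numx : Int) (out : List Int) : Decidable (Spec_scangenes genes numx out) := by unfold Spec_scangenes; infer_instance

-- ===== CLAIM (what is proved, stated in full; the proofs are below) =====
def Claim_equal_scangenes : Prop := ∀ (genes : List (List String)) (numx : Int), Dom_scangenes genes numx → Spec_scangenes genes numx (scangenes genes numx)

-- ===== LEMMAS AND PROOFS =====

/- ## Decimal representation: str(n) for n ≥ 0 -/
def rep10 (n : Nat) : List Char :=
  if n < 10 then [Nat.digitChar n] else rep10 (n / 10) ++ [Nat.digitChar (n % 10)]
termination_by n
decreasing_by exact Nat.div_lt_self (by omega) (by omega)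

theorem digitChar_isdigit {k : Nat} (h : k < 10) : PySem.Chars.isdigit (Nat.digitChar k) = true := by
  interval_cases k <;> decide

theorem digitChar_toNat {k : Nat} (h : k < 10) : (Nat.digitChar k).toNat = 48 + k := by
  interval_cases k <;> decide

theorem rep10_ne_nil (n : Nat) : rep10 n ≠ [] := by
  unfold rep10; split <;> simp

theorem rep10_digits (n : Nat) : ∀ c ∈ rep10 n, PySem.Chars.isdigit c = true := by
  fun_induction rep10 n with
  | case1 n h => simpa using digitChar_isdigit h
  | case2 n h ih =>
    intro c hc
    rcases List.mem_append.1 hc with h' | h'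
    · exact ih c h'
    · simp only [List.mem_singleton] at h'
      subst h'
      exact digitChar_isdigit (Nat.mod_lt _ (by omega))

def val10 (l : List Char) : Nat := l.foldl (fun a c => a * 10 + (c.toNat - 48)) 0

theorem val10_rep10 (n : Nat) : val10 (rep10 n) = n := by
  fun_induction rep10 n with
  | case1 n h => simp [val10, digitChar_toNat h]
  | case2 n h ih =>
    have hm : n % 10 < 10 := Nat.mod_lt _ (by omega)
    have : val10 (rep10 (n / 10) ++ [Nat.digitChar (n % 10)])
        = val10 (rep10 (n / 10)) * 10 + ((Nat.digitChar (n % 10)).toNat - 48) := by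
      simp [val10, List.foldl_append]
    rw [this, ih, digitChar_toNat hm]
    omega

theorem rep10_inj {a b : Nat} (h : rep10 a = rep10 b) : a = b := by
  have := val10_rep10 a
  rw [h, val10_rep10] at this
  omega

theorem rep10_eq_low {n : Nat} (h : n < 10) : rep10 n = [Nat.digitChar n] := by
  conv_lhs => rw [rep10]
  rw [if_pos h]

theorem rep10_eq_high {n : Nat} (h : 10 ≤ n) : rep10 n = rep10 (n / 10) ++ [Nat.digitChar (n % 10)] := by
  conv_lhs => rw [rep10]
  rw [if_neg (by omega)]

theorem toDigitsCore_eq_rep10 (fuel : Nat) : ∀ (n : Nat) (ds : List Char), n < fuel →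
    Nat.toDigitsCore 10 fuel n ds = rep10 n ++ ds := by
  induction fuel with
  | zero => intro n ds h; omega
  | succ fuel ih =>
    intro n ds h
    rw [Nat.toDigitsCore]
    by_cases h10 : n / 10 = 0
    · have hn : n < 10 := by omega
      rw [if_pos h10, rep10_eq_low hn]
      rw [Nat.mod_eq_of_lt hn]
      rfl
    · have hn : 10 ≤ n := by
        by_contra hc
        exact h10 (Nat.div_eq_of_lt (by omega))
      have hlt : n / 10 < n := Nat.div_lt_self (by omega) (by omega)
      rw [if_neg h10, ih (n / 10) _ (by omega)]
      rw [rep10_eq_high hn]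
      simp

theorem toChars_eq_rep10 {n : Int} (h : 0 ≤ n) : PySem.Int.toChars n = rep10 n.toNat := by
  unfold PySem.Int.toChars
  rw [if_neg (by omega)]
  unfold Nat.toDigits
  rw [toDigitsCore_eq_rep10 _ _ _ (Nat.lt_succ_self _)]
  simp

theorem toChars_digits {n : Int} (h : 0 ≤ n) : ∀ c ∈ PySem.Int.toChars n, PySem.Chars.isdigit c = true := by
  rw [toChars_eq_rep10 h]; exact rep10_digits _

theorem toChars_ne_nil {n : Int} (h : 0 ≤ n) : PySem.Int.toChars n ≠ [] := by
  rw [toChars_eq_rep10 h]; exact rep10_ne_nil _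

theorem toChars_inj {a b : Int} (ha : 0 ≤ a) (hb : 0 ≤ b)
    (h : PySem.Int.toChars a = PySem.Int.toChars b) : a = b := by
  rw [toChars_eq_rep10 ha, toChars_eq_rep10 hb] at h
  have := rep10_inj h
  omega

/- ## Occurrence counting: occ p l = number of positions of l where p starts -/
def occ (p : List Char) : List Char → Nat
  | [] => 0
  | c :: t => (if p.isPrefixOf (c :: t) then 1 else 0) + occ p t

theorem occ_append_not_head {h : Char} {q t r : List Char} (ht : ∀ c ∈ t, c ≠ h) :
    occ (h :: q) (t ++ r) = occ (h :: q) r := by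
  induction t with
  | nil => rfl
  | cons c t' ih =>
    have hc : c ≠ h := ht c (by simp)
    simp only [List.cons_append, occ, List.isPrefixOf]
    rw [ih (fun c hc' => ht c (by simp [hc']))]
    simp [beq_eq_false_iff_ne.2 (Ne.symm hc)]

theorem count_go_eq_occ {a : Char} {q : List Char} (hq : ∀ c ∈ q, c ≠ a) :
    ∀ (fuel : Nat) (l : List Char) (acc : Nat), l.length ≤ fuel →
    PySem.Chars.count.go (a :: q) fuel l acc = acc + occ (a :: q) l := by
  intro fuel
  induction fuel with
  | zero =>
    intro l acc h
    have : l = [] := by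
      cases l with
      | nil => rfl
      | cons c t => simp at h
    subst this; rfl
  | succ fuel ih =>
    intro l acc h
    cases l with
    | nil => rfl
    | cons c t =>
      rw [PySem.Chars.count.go]
      by_cases hp : (a :: q).isPrefixOf (c :: t) = true
      · rw [if_pos hp]
        obtain ⟨r, hr⟩ := List.isPrefixOf_iff_prefix.1 hp
        rw [List.cons_append] at hr
        injection hr with hca ht
        subst hca
        subst ht
        have hdrop : List.drop (a :: q).length (a :: (q ++ r)) = r := by
          have := List.drop_left (l₁ := a :: q) (l₂ := r)
          simpa using this
        rw [hdrop, ih r (acc + 1) (by simp at h ⊢; omega)]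
        have hocc : occ (a :: q) (a :: (q ++ r)) = 1 + occ (a :: q) r := by
          simp only [occ, occ_append_not_head hq, hp, if_true]
        omega
      · rw [if_neg hp]
        rw [ih t acc (by simp at h; omega)]
        simp [occ, hp]

theorem count_eq_occ {a : Char} {q l : List Char} (hq : ∀ c ∈ q, c ≠ a) :
    PySem.Chars.count l (a :: q) = occ (a :: q) l := by
  unfold PySem.Chars.count
  rw [if_neg (by simp)]
  rw [count_go_eq_occ hq _ _ _ (le_refl _)]
  omega

/- ## A digit block followed by a non-digit is located unambiguously -/
theorem prefix_block {a : List Char} : ∀ {b : List Char} {r : List Char} {d e : Char},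
    (∀ c ∈ a, PySem.Chars.isdigit c = true) → (∀ c ∈ b, PySem.Chars.isdigit c = true) →
    PySem.Chars.isdigit d = false → PySem.Chars.isdigit e = false →
    ((a ++ [d]).isPrefixOf (b ++ e :: r) = true ↔ a = b ∧ d = e) := by
  induction a with
  | nil =>
    intro b r d e _ hb hd he
    cases b with
    | nil => simp [List.isPrefixOf]
    | cons c b' =>
      have hc : PySem.Chars.isdigit c = true := hb c (by simp)
      have : d ≠ c := by intro h; rw [h] at hd; rw [hd] at hc; exact absurd hc (by simp)
      simp [List.isPrefixOf, beq_eq_false_iff_ne.2 this]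
  | cons c a' ih =>
    intro b r d e ha hb hd he
    cases b with
    | nil =>
      have hc : PySem.Chars.isdigit c = true := ha c (by simp)
      have : c ≠ e := by intro h; rw [h] at hc; rw [he] at hc; exact absurd hc (by simp)
      simp [List.isPrefixOf, beq_eq_false_iff_ne.2 this]
    | cons c2 b' =>
      simp only [List.cons_append, List.isPrefixOf, Bool.and_eq_true, beq_iff_eq]
      rw [ih (fun x hx => ha x (by simp [hx])) (fun x hx => hb x (by simp [hx])) hd he]
      constructor
      · rintro ⟨h1, h2, h3⟩; exact ⟨by rw [h1, h2], h3⟩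
      · rintro ⟨h1, h2⟩; injection h1 with h1a h1b; exact ⟨h1a, h1b, h2⟩

/- ## The scanner counts exactly the ',' and ')' delimited occurrences -/
theorem isdigit_ne_x {c : Char} (h : PySem.Chars.isdigit c = true) : c ≠ 'x' := by
  intro hx; subst hx; exact absurd h (by decide)

theorem at0_eq {n : Int} (hn : 1 ≤ n) {ds tl : List Char} {d d' : Char}
    (hds : ∀ c ∈ ds, PySem.Chars.isdigit c = true)
    (hd : PySem.Chars.isdigit d = false) (hd' : PySem.Chars.isdigit d' = false) :
    ((PySem.Int.toChars n ++ [d']).isPrefixOf (ds ++ d :: tl) = true) ↔ (PySem.Int.toChars n = ds ∧ d' = d) :=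
  prefix_block (toChars_digits (by omega)) hds hd' hd

theorem occ_pat_cons_x {n : Int} (hn : 1 ≤ n) {d' : Char} (hd' : PySem.Chars.isdigit d' = false)
    (tail : List Char) :
    occ ('x' :: (PySem.Int.toChars n ++ [d'])) ('x' :: tail)
      = (if (PySem.Int.toChars n ++ [d']).isPrefixOf tail = true then 1 else 0)
        + occ ('x' :: (PySem.Int.toChars n ++ [d'])) tail := by
  simp [occ, List.isPrefixOf]

theorem occ_pat_digits {n : Int} (hn : 1 ≤ n) {d' : Char} {ds r : List Char}
    (hds : ∀ c ∈ ds, PySem.Chars.isdigit c = true) :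
    occ ('x' :: (PySem.Int.toChars n ++ [d'])) (ds ++ r)
      = occ ('x' :: (PySem.Int.toChars n ++ [d'])) r :=
  occ_append_not_head (fun c hc => isdigit_ne_x (hds c hc))

theorem scan_count (cs : List Char) (n : Int) (hn : 1 ≤ n) :
    (scanRuns cs).count (PySem.Int.toChars n)
      = occ ('x' :: (PySem.Int.toChars n ++ [','])) cs
        + occ ('x' :: (PySem.Int.toChars n ++ [')'])) cs := by
  fun_induction scanRuns cs with
  | case1 => simp [occ]
  | case2 tail rest' hrest' =>
    have htw : tail.takeWhile PySem.Chars.isdigit = tail := by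
      have h1 := List.takeWhile_append_dropWhile (p := PySem.Chars.isdigit) (l := tail)
      rw [show List.dropWhile PySem.Chars.isdigit tail = rest' from rfl, hrest'] at h1
      simpa using h1
    have hds : ∀ c ∈ tail, PySem.Chars.isdigit c = true := by
      intro c hc
      exact List.mem_takeWhile_imp (show c ∈ tail.takeWhile PySem.Chars.isdigit by rw [htw]; exact hc)
    have hocc : ∀ d' : Char, PySem.Chars.isdigit d' = false →
        occ ('x' :: (PySem.Int.toChars n ++ [d'])) ('x' :: tail) = 0 := by
      intro d' hd'
      rw [occ_pat_cons_x hn hd' tail]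
      rw [show occ ('x' :: (PySem.Int.toChars n ++ [d'])) tail
            = occ ('x' :: (PySem.Int.toChars n ++ [d'])) ([] : List Char) from by
        conv_lhs => rw [show tail = tail ++ ([] : List Char) by simp]
        exact occ_pat_digits hn hds]
      rw [if_neg ?_]
      · rfl
      · intro hpre
        have hmem : d' ∈ tail := by
          have hsub := (List.isPrefixOf_iff_prefix.1 hpre).sublist
          exact hsub.mem (by simp)
        rw [hds d' hmem] at hd'
        exact absurd hd' (by simp)
    rw [hocc ',' (by decide), hocc ')' (by decide)]
    simp
  | case3 tail ds rest' d tail1 hrest' hcond ih =>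
    have hds : ∀ c ∈ ds, PySem.Chars.isdigit c = true := fun c hc => List.mem_takeWhile_imp hc
    have hsplit : tail = ds ++ (d :: tail1) := by
      rw [← hrest']
      exact (List.takeWhile_append_dropWhile (p := PySem.Chars.isdigit) (l := tail)).symm
    have hd : PySem.Chars.isdigit d = false := by
      have h1 := List.head?_dropWhile_not PySem.Chars.isdigit tail
      rw [show List.dropWhile PySem.Chars.isdigit tail = rest' from rfl, hrest'] at h1
      simpa using h1
    rw [hrest'] at ih
    have key : ∀ d' : Char, PySem.Chars.isdigit d' = false →
        occ ('x' :: (PySem.Int.toChars n ++ [d'])) ('x' :: tail)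
          = (if PySem.Int.toChars n = ds ∧ d' = d then 1 else 0)
            + occ ('x' :: (PySem.Int.toChars n ++ [d'])) (d :: tail1) := by
      intro d' hd'
      rw [occ_pat_cons_x hn hd' tail]
      conv_lhs => rw [hsplit, occ_pat_digits hn hds]
      congr 1
      by_cases hcase : PySem.Int.toChars n = ds ∧ d' = d
      · rw [if_pos ?_, if_pos hcase]
        exact (at0_eq hn hds hd hd').2 hcase
      · rw [if_neg ?_, if_neg hcase]
        intro hpre
        exact hcase ((at0_eq hn hds hd hd').1 hpre)
    rw [key ',' (by decide), key ')' (by decide)]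
    rw [List.count_cons, hrest', ih]
    rcases hcond.1 with hdc | hdc <;> subst hdc <;>
      by_cases he : PySem.Int.toChars n = ds
    · simp [he] <;> omega
    · have hne : ¬ (ds = PySem.Int.toChars n) := fun h => he h.symm
      simp [he, hne] <;> omega
    · simp [he] <;> omega
    · have hne : ¬ (ds = PySem.Int.toChars n) := fun h => he h.symm
      simp [he, hne] <;> omega
  | case4 tail ds rest' d tail1 hrest' hcond ih =>
    have hds : ∀ c ∈ ds, PySem.Chars.isdigit c = true := fun c hc => List.mem_takeWhile_imp hc
    have hsplit : tail = ds ++ (d :: tail1) := by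
      rw [← hrest']
      exact (List.takeWhile_append_dropWhile (p := PySem.Chars.isdigit) (l := tail)).symm
    have hd : PySem.Chars.isdigit d = false := by
      have h1 := List.head?_dropWhile_not PySem.Chars.isdigit tail
      rw [show List.dropWhile PySem.Chars.isdigit tail = rest' from rfl, hrest'] at h1
      simpa using h1
    rw [hrest'] at ih
    have key : ∀ d' : Char, PySem.Chars.isdigit d' = false → (d' = ',' ∨ d' = ')') →
        occ ('x' :: (PySem.Int.toChars n ++ [d'])) ('x' :: tail)
          = occ ('x' :: (PySem.Int.toChars n ++ [d'])) (d :: tail1) := by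
      intro d' hd' hdelim
      rw [occ_pat_cons_x hn hd' tail]
      conv_lhs => rw [hsplit, occ_pat_digits hn hds]
      rw [if_neg ?_]
      · exact Nat.zero_add _
      · intro hpre
        obtain ⟨h1, h2⟩ := (at0_eq hn hds hd hd').1 hpre
        apply hcond
        constructor
        · rcases hdelim with h | h <;> rw [← h2, h] <;> simp
        · rw [← h1]
          exact toChars_ne_nil (by omega)
    rw [key ',' (by decide) (Or.inl rfl), key ')' (by decide) (Or.inr rfl), hrest', ih]
  | case5 c tail hc ih =>
    have hskip : ∀ d' : Char,
        occ ('x' :: (PySem.Int.toChars n ++ [d'])) (c :: tail)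
          = occ ('x' :: (PySem.Int.toChars n ++ [d'])) tail := by
      intro d'
      simp [occ, List.isPrefixOf, beq_eq_false_iff_ne.2 (Ne.symm hc)]
    rw [hskip ',', hskip ')', ih]

/- ## The lookup table -/
theorem mkTable_nonpos {numx : Int} (h : numx ≤ 0) : mkTable numx = PySem.Dict.empty := by
  unfold mkTable
  rw [show PySem.List.pyRange 1 (numx + 1) 1 = [] from by simp [PySem.List.pyRange]; omega]
  rfl

theorem mkTable_succ (m : Nat) :
    mkTable ((m : Int) + 1) = (mkTable (m : Int)).insert (PySem.Int.toChars ((m : Int) + 1)) (m : Int) := by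
  unfold mkTable
  rw [PySem.List.pyRange_one_succ_right (by omega : (1 : Int) ≤ (m : Int) + 1)]
  rw [List.foldl_append]
  simp

theorem table_get_nat (m : Nat) : ∀ (ds : List Char) (k : Int),
    (mkTable (m : Int)).get? ds = some k ↔ (0 ≤ k ∧ k < (m : Int) ∧ ds = PySem.Int.toChars (k + 1)) := by
  induction m with
  | zero =>
    intro ds k
    rw [show ((0 : Nat) : Int) = 0 by rfl, mkTable_nonpos (le_refl 0)]
    constructor
    · intro h; exact absurd h (by simp [PySem.Dict.empty, PySem.Dict.get?])
    · rintro ⟨h1, h2, -⟩; omega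
  | succ m ih =>
    intro ds k
    rw [show ((m + 1 : Nat) : Int) = (m : Int) + 1 by push_cast; ring, mkTable_succ m]
    by_cases hds : ds = PySem.Int.toChars ((m : Int) + 1)
    · subst hds
      rw [PySem.Dict.get?_insert_self]
      constructor
      · rintro h
        injection h with h
        refine ⟨by omega, by omega, by rw [← h]⟩
      · rintro ⟨h1, h2, h3⟩
        have : (m : Int) + 1 = k + 1 := toChars_inj (by omega) (by omega) h3
        have : k = (m : Int) := by omega
        rw [this]
    · rw [PySem.Dict.get?_insert_of_ne _ _ hds, ih ds k]
      constructor
      · rintro ⟨h1, h2, h3⟩; exact ⟨h1, by omega, h3⟩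
      · rintro ⟨h1, h2, h3⟩
        refine ⟨h1, ?_, h3⟩
        by_contra hlt
        have hk : k = (m : Int) := by omega
        exact hds (by rw [h3, hk])

theorem table_get (numx : Int) (ds : List Char) (k : Int) :
    (mkTable numx).get? ds = some k ↔ (0 ≤ k ∧ k < numx ∧ ds = PySem.Int.toChars (k + 1)) := by
  by_cases h : numx ≤ 0
  · rw [mkTable_nonpos h]
    constructor
    · intro hh; exact absurd hh (by simp [PySem.Dict.empty, PySem.Dict.get?])
    · rintro ⟨h1, h2, -⟩; omega
  · rw [show numx = (numx.toNat : Int) by omega]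

    exact table_get_nat numx.toNat ds k

/- ## Canonical forms of the two ports (definitionally equal to them) -/
def stepAj (gene : List String) (i : Int) (xh : List Int) (j : Int) : List Int :=
  let s : List Char := (PySem.List.pyGetD gene j "").toList
  let k1 : Int := PySem.Chars.count s (('x' :: PySem.Int.toChars (i + 1)) ++ [','])
  let k2 : Int := PySem.Chars.count s (('x' :: PySem.Int.toChars (i + 1)) ++ [')'])
  let xh' := if s = 'x' :: PySem.Int.toChars (i + 1) then PySem.List.pySetD xh i (PySem.List.pyGetD xh i 0 + 1) else xh
  PySem.List.pySetD xh' i (PySem.List.pyGetD xh' i 0 + (k1 + k2))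

def stepAi (gene : List String) (xh : List Int) (i : Int) : List Int :=
  (PySem.List.pyRange 0 (gene.length : Int) 1).foldl (stepAj gene i) xh

def stepAgene (numx : Int) (genes : List (List String)) (xh : List Int) (jj : Int) : List Int :=
  (PySem.List.pyRange 0 numx 1).foldl (stepAi (PySem.List.pyGetD genes jj [])) xh

def stepBrun (numx : Int) (counts : List Int) (ds : List Char) : List Int :=
  match (mkTable numx).get? ds with
  | some idx => PySem.List.pySetD counts idx (PySem.List.pyGetD counts idx 0 + 1)
  | none => counts

def stepBs (numx : Int) (counts : List Int) (s : String) : List Int :=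
  let cs := s.toList
  let counts := (scanRuns cs).foldl (stepBrun numx) counts
  match cs with
  | 'x' :: restCs =>
    (match (mkTable numx).get? restCs with
     | some idx => PySem.List.pySetD counts idx (PySem.List.pyGetD counts idx 0 + 1)
     | none => counts)
  | _ => counts

def stepBgene (numx : Int) (counts : List Int) (gene : List String) : List Int :=
  gene.foldl (stepBs numx) counts

theorem scangenes_canon (genes : List (List String)) (numx : Int) :
    scangenes genes numx
      = (PySem.List.pyRange 0 (genes.length : Int) 1).foldl (stepAgene numx genes)
          (List.replicate numx.toNat 0) := rfl

theorem scangenes_alt_canon (genes : List (List String)) (numx : Int) :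
    scangenes_alt genes numx = genes.foldl (stepBgene numx) (List.replicate numx.toNat 0) := rfl

/- ## Per-string contributions -/
def cPat (n : Int) (cs : List Char) : Int :=
  (if cs = 'x' :: PySem.Int.toChars n then (1 : Int) else 0)
  + ((PySem.Chars.count cs (('x' :: PySem.Int.toChars n) ++ [',']) : Int)
     + (PySem.Chars.count cs (('x' :: PySem.Int.toChars n) ++ [')']) : Int))

def cTok (n : Int) (cs : List Char) : Int :=
  ((scanRuns cs).count (PySem.Int.toChars n) : Int)
  + (if cs = 'x' :: PySem.Int.toChars n then 1 else 0)

theorem cPat_eq_cTok {n : Int} (hn : 1 ≤ n) (cs : List Char) : cPat n cs = cTok n cs := by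
  unfold cPat cTok
  have h1 : PySem.Chars.count cs (('x' :: PySem.Int.toChars n) ++ [','])
      = occ ('x' :: (PySem.Int.toChars n ++ [','])) cs := by
    rw [List.cons_append]
    exact count_eq_occ (fun c hc => by
      rcases List.mem_append.1 hc with h | h
      · exact isdigit_ne_x (toChars_digits (by omega) c h)
      · simp at h; subst h; decide)
  have h2 : PySem.Chars.count cs (('x' :: PySem.Int.toChars n) ++ [')'])
      = occ ('x' :: (PySem.Int.toChars n ++ [')'])) cs := by
    rw [List.cons_append]
    exact count_eq_occ (fun c hc => by
      rcases List.mem_append.1 hc with h | h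
      · exact isdigit_ne_x (toChars_digits (by omega) c h)
      · simp at h; subst h; decide)
  rw [h1, h2, scan_count cs n hn]
  push_cast
  ring

/- ## Generic pointwise lemma for folds of additive index updates -/
theorem foldl_additive {α : Type} (L0 : Nat) (l : List α) (F : List Int → α → List Int)
    (g : α → Nat → Int)
    (hlen : ∀ xh a, a ∈ l → xh.length = L0 → (F xh a).length = L0)
    (hget : ∀ xh (k : Nat), xh.length = L0 → k < L0 → ∀ a ∈ l,
      PySem.List.pyGetD (F xh a) (k : Int) 0 = PySem.List.pyGetD xh (k : Int) 0 + g a k) :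
    ∀ xh, xh.length = L0 → (l.foldl F xh).length = L0 ∧
      ∀ k : Nat, k < L0 → PySem.List.pyGetD (l.foldl F xh) (k : Int) 0
        = PySem.List.pyGetD xh (k : Int) 0 + (l.map (fun a => g a k)).sum := by
  induction l with
  | nil => intro xh hxh; exact ⟨hxh, fun k hk => by simp⟩
  | cons a l ih =>
    intro xh hxh
    have hFa : (F xh a).length = L0 := hlen xh a (by simp) hxh
    have ih' := ih (fun xh b hb => hlen xh b (by simp [hb]))
      (fun xh k h1 h2 b hb => hget xh k h1 h2 b (by simp [hb])) (F xh a) hFa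
    refine ⟨ih'.1, fun k hk => ?_⟩
    rw [List.foldl_cons, ih'.2 k hk, hget xh k hxh hk a (by simp)]
    simp [add_assoc]

theorem sum_single_hit (m k : Nat) (v : Nat → Int) :
    ((List.range m).map (fun i => if k = i then v i else 0)).sum = if k < m then v k else 0 := by
  induction m with
  | zero => simp
  | succ m ih =>
    rw [List.range_succ, List.map_append, List.sum_append, ih]
    simp only [List.map_cons, List.map_nil, List.sum_cons, List.sum_nil]
    by_cases h2 : k = m
    · subst h2
      rw [if_neg (lt_irrefl k)]
      rw [if_pos (show k < k + 1 by omega)]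
      omega
    · rw [if_neg h2]
      by_cases h1 : k < m
      · rw [if_pos h1, if_pos (by omega)]
        omega
      · rw [if_neg h1, if_neg (by omega)]
        omega

theorem sum_ind_eq_count (l : List (List Char)) (v : List Char) :
    (l.map (fun a => if a = v then (1 : Int) else 0)).sum = (l.count v : Int) := by
  induction l with
  | nil => simp
  | cons a l ih =>
    rw [List.map_cons, List.sum_cons, ih, List.count_cons]
    by_cases h : a = v
    · simp [h]
      omega
    · have : ¬ (a == v) = true := by simp [h]
      simp [h, this]

theorem sum_map_pyGetD {α : Type} (xs : List α) (d : α) (h : α → Int) :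
    ((PySem.List.pyRange 0 (xs.length : Int) 1).map (fun j => h (PySem.List.pyGetD xs j d))).sum
      = (xs.map h).sum := by
  have h1 : ((PySem.List.pyRange 0 (xs.length : Int) 1).map (fun j => PySem.List.pyGetD xs j d)).map h
      = xs.map h := by
    rw [show ((xs.length : Int)) = PySem.List.len xs from rfl, PySem.List.map_pyGetD_pyRange_zero]
  rw [← h1, List.map_map]
  rfl

theorem getD_setD_pair (xh : List Int) (iN k : Nat) (v : Int) (hi : iN < xh.length) :
    PySem.List.pyGetD (PySem.List.pySetD xh (iN : Int) v) (k : Int) 0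
      = if k = iN then v else PySem.List.pyGetD xh (k : Int) 0 :=
  PySem.List.pyGetD_pySetD_natCast xh iN k v 0 hi

theorem foldl_len_pres {α : Type} (l : List α) (F : List Int → α → List Int)
    (h : ∀ xh a, (F xh a).length = xh.length) :
    ∀ xh, (l.foldl F xh).length = xh.length := by
  induction l with
  | nil => intro xh; rfl
  | cons a l ih => intro xh; rw [List.foldl_cons, ih, h]

/- ## A-side pointwise facts -/
theorem stepAj_len (gene : List String) (i : Int) (xh : List Int) (j : Int) :
    (stepAj gene i xh j).length = xh.length := by
  simp only [stepAj]
  split <;> simp [PySem.List.length_pySetD]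

theorem stepAj_getD (gene : List String) (i : Int) (hi0 : 0 ≤ i) {L0 : Nat} (hiL : i.toNat < L0)
    (xh : List Int) (hlen : xh.length = L0) (k : Nat) (hk : k < L0) (j : Int) :
    PySem.List.pyGetD (stepAj gene i xh j) (k : Int) 0
      = PySem.List.pyGetD xh (k : Int) 0
        + (if (k : Int) = i then cPat (i + 1) ((PySem.List.pyGetD gene j "").toList) else 0) := by
  have hiN : i = (i.toNat : Int) := by omega
  simp only [stepAj]
  rw [hiN]
  by_cases hcs : (PySem.List.pyGetD gene j "").toList = 'x' :: PySem.Int.toChars ((i.toNat : Int) + 1)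
  · rw [if_pos hcs]
    rw [getD_setD_pair _ _ _ _ (by rw [PySem.List.length_pySetD]; omega)]
    rw [getD_setD_pair _ _ _ _ (by omega)]
    rw [getD_setD_pair _ _ _ _ (by omega)]
    by_cases hk' : k = i.toNat
    · rw [if_pos hk', if_pos (rfl : i.toNat = i.toNat)]
      rw [if_pos (show ((k : Nat) : Int) = ((i.toNat : Nat) : Int) by omega)]
      rw [show ((k : Nat) : Int) = ((i.toNat : Nat) : Int) by omega]
      rw [show cPat ((i.toNat : Int) + 1) ((PySem.List.pyGetD gene j "").toList)
          = 1 + (((PySem.Chars.count ((PySem.List.pyGetD gene j "").toList)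
              (('x' :: PySem.Int.toChars ((i.toNat : Int) + 1)) ++ [',']) : Int))
            + ((PySem.Chars.count ((PySem.List.pyGetD gene j "").toList)
              (('x' :: PySem.Int.toChars ((i.toNat : Int) + 1)) ++ [')']) : Int))) from by
        unfold cPat; rw [if_pos hcs]]
      ring
    · rw [if_neg hk', if_neg hk', if_neg (show ¬ ((k : Int) = ((i.toNat : Nat) : Int)) by omega)]
      ring
  · rw [if_neg hcs]
    rw [getD_setD_pair _ _ _ _ (by omega)]
    by_cases hk' : k = i.toNat
    · rw [if_pos hk']
      rw [if_pos (show ((k : Nat) : Int) = ((i.toNat : Nat) : Int) by omega)]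
      rw [show ((k : Nat) : Int) = ((i.toNat : Nat) : Int) by omega]
      rw [show cPat ((i.toNat : Int) + 1) ((PySem.List.pyGetD gene j "").toList)
          = 0 + (((PySem.Chars.count ((PySem.List.pyGetD gene j "").toList)
              (('x' :: PySem.Int.toChars ((i.toNat : Int) + 1)) ++ [',']) : Int))
            + ((PySem.Chars.count ((PySem.List.pyGetD gene j "").toList)
              (('x' :: PySem.Int.toChars ((i.toNat : Int) + 1)) ++ [')']) : Int))) from by
        unfold cPat; rw [if_neg hcs]]
      ring
    · rw [if_neg hk', if_neg (show ¬ ((k : Int) = ((i.toNat : Nat) : Int)) by omega)]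
      ring

theorem stepAi_len (gene : List String) (xh : List Int) (i : Int) :
    (stepAi gene xh i).length = xh.length :=
  foldl_len_pres _ _ (fun xh j => stepAj_len gene i xh j) xh

theorem stepAi_getD (gene : List String) (i : Int) (hi0 : 0 ≤ i) {L0 : Nat} (hiL : i.toNat < L0)
    (xh : List Int) (hlen : xh.length = L0) (k : Nat) (hk : k < L0) :
    PySem.List.pyGetD (stepAi gene xh i) (k : Int) 0
      = PySem.List.pyGetD xh (k : Int) 0
        + (if (k : Int) = i then (gene.map (fun str => cPat (i + 1) str.toList)).sum else 0) := by
  have h := (foldl_additive L0 (PySem.List.pyRange 0 (gene.length : Int) 1) (stepAj gene i)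
    (fun j k => if (k : Int) = i then cPat (i + 1) ((PySem.List.pyGetD gene j "").toList) else 0)
    (fun xh a _ hx => by rw [stepAj_len]; exact hx)
    (fun xh k h1 h2 a _ => stepAj_getD gene i hi0 hiL xh h1 k h2 a)
    xh hlen).2 k hk
  rw [stepAi] at *
  rw [h]
  congr 1
  by_cases hk' : (k : Int) = i
  · rw [if_pos hk']
    have : (fun j => if (k : Int) = i then cPat (i + 1) ((PySem.List.pyGetD gene j "").toList) else 0)
        = fun j => cPat (i + 1) ((PySem.List.pyGetD gene j "").toList) := by
      funext j; rw [if_pos hk']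
    rw [this]
    exact sum_map_pyGetD gene "" (fun str => cPat (i + 1) str.toList)
  · rw [if_neg hk']
    have : (fun j => if (k : Int) = i then cPat (i + 1) ((PySem.List.pyGetD gene j "").toList) else 0)
        = fun _ => (0 : Int) := by
      funext j; rw [if_neg hk']
    rw [this]
    simp

theorem stepAgene_len (numx : Int) (genes : List (List String)) (xh : List Int) (jj : Int) :
    (stepAgene numx genes xh jj).length = xh.length :=
  foldl_len_pres _ _ (fun xh i => stepAi_len _ xh i) xh

theorem stepAgene_getD (numx : Int) (genes : List (List String)) (xh : List Int)
    (hlen : xh.length = numx.toNat) (k : Nat) (hk : k < numx.toNat) (jj : Int) :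
    PySem.List.pyGetD (stepAgene numx genes xh jj) (k : Int) 0
      = PySem.List.pyGetD xh (k : Int) 0
        + ((PySem.List.pyGetD genes jj []).map (fun str => cPat ((k : Int) + 1) str.toList)).sum := by
  have h := (foldl_additive numx.toNat (PySem.List.pyRange 0 numx 1)
    (stepAi (PySem.List.pyGetD genes jj []))
    (fun i k => if (k : Int) = i
      then ((PySem.List.pyGetD genes jj []).map (fun str => cPat (i + 1) str.toList)).sum else 0)
    (fun xh a _ hx => by rw [stepAi_len]; exact hx)
    (fun xh k h1 h2 a ha => by
      have hm := PySem.List.mem_pyRange_one.1 ha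
      exact stepAi_getD _ a hm.1 (by omega) xh h1 k h2)
    xh hlen).2 k hk
  rw [stepAgene] at *
  rw [h]
  congr 1
  have hpos : numx = ((numx.toNat : Nat) : Int) := by omega
  rw [hpos, PySem.List.pyRange_zero_natCast, List.map_map]
  have : ((fun i => if (k : Int) = i
      then ((PySem.List.pyGetD genes jj []).map (fun str => cPat (i + 1) str.toList)).sum else 0)
      ∘ fun kk : Nat => (kk : Int))
      = fun kk : Nat => if k = kk
        then ((PySem.List.pyGetD genes jj []).map (fun str => cPat ((kk : Int) + 1) str.toList)).sum
        else 0 := by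
    funext kk
    simp [Function.comp, Nat.cast_inj]
  rw [this, sum_single_hit, if_pos hk]

/- ## B-side pointwise facts -/
theorem stepBrun_len (numx : Int) (counts : List Int) (ds : List Char) :
    (stepBrun numx counts ds).length = counts.length := by
  unfold stepBrun
  split <;> simp [PySem.List.length_pySetD]

theorem stepBrun_getD (numx : Int) (counts : List Int) (hlen : counts.length = numx.toNat)
    (k : Nat) (hk : k < numx.toNat) (ds : List Char) :
    PySem.List.pyGetD (stepBrun numx counts ds) (k : Int) 0
      = PySem.List.pyGetD counts (k : Int) 0
        + (if ds = PySem.Int.toChars ((k : Int) + 1) then 1 else 0) := by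
  unfold stepBrun
  rcases hg : (mkTable numx).get? ds with _ | idx
  · simp only [hg]
    have hne : ¬ (ds = PySem.Int.toChars ((k : Int) + 1)) := by
      intro hds
      have h := (table_get numx ds (k : Int)).2 ⟨by omega, by omega, hds⟩
      rw [hg] at h
      exact absurd h (by simp)
    rw [if_neg hne]
    ring
  · obtain ⟨h0, h1, h2⟩ := (table_get numx ds idx).1 hg
    simp only [hg]
    have hidx : idx = (idx.toNat : Int) := by omega
    rw [hidx, getD_setD_pair _ _ _ _ (by omega)]
    by_cases hk' : k = idx.toNat
    · subst hk'
      rw [if_pos rfl, if_pos (by rw [h2]; congr 1; omega)]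
    · have hne : ¬ (ds = PySem.Int.toChars ((k : Int) + 1)) := by
        intro hds
        rw [hds] at h2
        have := toChars_inj (by omega) (by omega) h2.symm
        omega
      rw [if_neg hk', if_neg hne]
      ring

theorem stepBs_len (numx : Int) (counts : List Int) (s : String) :
    (stepBs numx counts s).length = counts.length := by
  simp only [stepBs]
  have h1 := foldl_len_pres (scanRuns s.toList) (stepBrun numx) (stepBrun_len numx) counts
  split
  · split
    · simp [PySem.List.length_pySetD, h1]
    · exact h1
  · exact h1

theorem stepBs_getD (numx : Int) (counts : List Int) (hlen : counts.length = numx.toNat)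
    (k : Nat) (hk : k < numx.toNat) (s : String) :
    PySem.List.pyGetD (stepBs numx counts s) (k : Int) 0
      = PySem.List.pyGetD counts (k : Int) 0 + cTok ((k : Int) + 1) s.toList := by
  have hrun := foldl_additive numx.toNat (scanRuns s.toList) (stepBrun numx)
    (fun ds k => if ds = PySem.Int.toChars ((k : Int) + 1) then 1 else 0)
    (fun c a _ hx => by rw [stepBrun_len]; exact hx)
    (fun c k h1 h2 a _ => stepBrun_getD numx c h1 k h2 a)
    counts hlen
  have hval : PySem.List.pyGetD ((scanRuns s.toList).foldl (stepBrun numx) counts) (k : Int) 0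
      = PySem.List.pyGetD counts (k : Int) 0
        + ((scanRuns s.toList).count (PySem.Int.toChars ((k : Int) + 1)) : Int) := by
    rw [(hrun.2) k hk]
    simp only []
    rw [sum_ind_eq_count]
  have hlen' : ((scanRuns s.toList).foldl (stepBrun numx) counts).length = numx.toNat := hrun.1
  simp only [stepBs]
  split
  · next restCs heq =>
    have : (match (mkTable numx).get? restCs with
        | some idx => PySem.List.pySetD ((scanRuns s.toList).foldl (stepBrun numx) counts) idx
            (PySem.List.pyGetD ((scanRuns s.toList).foldl (stepBrun numx) counts) idx 0 + 1)
        | none => (scanRuns s.toList).foldl (stepBrun numx) counts)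
        = stepBrun numx ((scanRuns s.toList).foldl (stepBrun numx) counts) restCs := rfl
    rw [this, stepBrun_getD numx _ hlen' k hk restCs, hval]
    unfold cTok
    rw [heq]
    have : ('x' :: restCs = 'x' :: PySem.Int.toChars ((k : Int) + 1))
        ↔ (restCs = PySem.Int.toChars ((k : Int) + 1)) := by simp
    by_cases hr : restCs = PySem.Int.toChars ((k : Int) + 1)
    · rw [if_pos hr, if_pos (this.2 hr)]
      ring
    · rw [if_neg hr, if_neg (fun hh => hr (this.1 hh))]
      ring
  · next hne =>
    rw [hval]
    unfold cTok
    rw [if_neg (fun hh => hne (PySem.Int.toChars ((k : Int) + 1)) hh)]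
    ring

theorem stepBgene_len (numx : Int) (counts : List Int) (gene : List String) :
    (stepBgene numx counts gene).length = counts.length :=
  foldl_len_pres _ _ (fun c s => stepBs_len numx c s) counts

theorem stepBgene_getD (numx : Int) (counts : List Int) (hlen : counts.length = numx.toNat)
    (k : Nat) (hk : k < numx.toNat) (gene : List String) :
    PySem.List.pyGetD (stepBgene numx counts gene) (k : Int) 0
      = PySem.List.pyGetD counts (k : Int) 0
        + (gene.map (fun s => cTok ((k : Int) + 1) s.toList)).sum := by
  exact (foldl_additive numx.toNat gene (stepBs numx)
    (fun s k => cTok ((k : Int) + 1) s.toList)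
    (fun c a _ hx => by rw [stepBs_len]; exact hx)
    (fun c k h1 h2 a _ => stepBs_getD numx c h1 k h2 a)
    counts hlen).2 k hk

/- ## Main equality -/
theorem scangenes_eq_alt (genes : List (List String)) (numx : Int) :
    scangenes genes numx = scangenes_alt genes numx := by
  rw [scangenes_canon, scangenes_alt_canon]
  have hA := foldl_additive numx.toNat (PySem.List.pyRange 0 (genes.length : Int) 1)
    (stepAgene numx genes)
    (fun jj k => ((PySem.List.pyGetD genes jj []).map (fun str => cPat ((k : Int) + 1) str.toList)).sum)
    (fun xh a _ hx => by rw [stepAgene_len]; exact hx)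
    (fun xh k h1 h2 a _ => stepAgene_getD numx genes xh h1 k h2 a)
    (List.replicate numx.toNat 0) (by simp)
  have hB := foldl_additive numx.toNat genes (stepBgene numx)
    (fun gene k => (gene.map (fun s => cTok ((k : Int) + 1) s.toList)).sum)
    (fun c a _ hx => by rw [stepBgene_len]; exact hx)
    (fun c k h1 h2 a _ => stepBgene_getD numx c h1 k h2 a)
    (List.replicate numx.toNat 0) (by simp)
  apply List.ext_getElem (by rw [hA.1, hB.1])
  intro k h1 h2
  have hk : k < numx.toNat := by rw [hA.1] at h1; exact h1
  have e1 : (((PySem.List.pyRange 0 (genes.length : Int) 1).foldl (stepAgene numx genes)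
      (List.replicate numx.toNat 0)))[k]
      = PySem.List.pyGetD ((PySem.List.pyRange 0 (genes.length : Int) 1).foldl
          (stepAgene numx genes) (List.replicate numx.toNat 0)) (k : Int) 0 := by
    rw [PySem.List.pyGetD_eq_getElem _ 0 (by omega) (by rw [hA.1]; exact_mod_cast hk)]
    simp
  have e2 : ((genes.foldl (stepBgene numx) (List.replicate numx.toNat 0)))[k]
      = PySem.List.pyGetD (genes.foldl (stepBgene numx) (List.replicate numx.toNat 0)) (k : Int) 0 := by
    rw [PySem.List.pyGetD_eq_getElem _ 0 (by omega) (by rw [hB.1]; exact_mod_cast hk)]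
    simp
  rw [e1, e2, hA.2 k hk, hB.2 k hk]
  congr 1
  rw [sum_map_pyGetD genes [] (fun gene => (gene.map (fun str => cPat ((k : Int) + 1) str.toList)).sum)]
  simp only [cPat_eq_cTok (by omega : 1 ≤ (k : Int) + 1)]

-- ===== VERDICT (by name: the statement is the Claim_ definition above) =====
theorem scangenes_spec : Claim_equal_scangenes := by
  intro genes numx _
  unfold Spec_scangenes
  exact scangenes_eq_alt genes numx
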